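-- pv_equiv track=rewrite | github.com/harjitmoe/mdplay | mdplay/cjk/parse_roma.py | unicify
-- ===== SOURCE A (Python) =====
-- _to_kana = {'gu': '\u30b0', '-': '\u30fc', 'ge': '\u30b2', 'ga': '\u30ac', 'go': '\u30b4', 'gi': '\u30ae', 'xo': '\u30a9', 'xtu': '\u30c3', 'tu': '\u30c4', 'to': '\u30c8', 'ti': '\u30c1', 'xto': '\u31f3', 'xmu': '\u31fa', '^': '\u30fc', 'ta': '\u30bf', 'do': '\u30c9', 'yo': '\u30e8', 'di': '\u30c2', 'ya': '\u30e4', 'de': '\u30c7', 'ye': '\U0001b001', 'da': '\u30c0', 'du': '\u30c5', 'yu': '\u30e6', 'xsu': '\u31f2', 't': '\u30c3', 'xsi': '\u31f1', 'xhi': '\u31f6', 'zo': '\u30be', 'zi': '\u30b8', 'ze': '\u30bc', 'za': '\u30b6', 'zu': '\u30ba', 'ru': '\u30eb', 're': '\u30ec', 'ra': '\u30e9', 'ro': '\u30ed', 'ri': '\u30ea', 'be': '\u30d9', 'we': '\u30f1', 'ba': '\u30d0', 'wa': '\u30ef', 'wo': '\u30f2', 'bo': '\u30dc', 'bi': '\u30d3',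 'wi': '\u30f0', 'bu': '\u30d6', 'xyo': '\u30e7', 'xnu': '\u31f4', 'so': '\u30bd', 'o': '\u30aa', '~': '\u301c', 'xi': '\u30a3', 'xyu': '\u30e5', 'xa': '\u30a1', 'xe': '\u30a7', 'xya': '\u30e3', 'xu': '\u30a5', 'pu': '\u30d7', '.': '\u3002', 'pa': '\u30d1', 'pe': '\u30da', 'pi': '\u30d4', 'po': '\u30dd', 'hu': '\u30d5', 'hi': '\u30d2', 'ho': '\u30db', 'ha': '\u30cf', 'he': '\u30d8', 'me': '\u30e1', 'xha': '\u31f5', 'te': '\u30c6', 'ma': '\u30de', 'xhe': '\u31f8', 'mo': '\u30e2', 'xho': '\u31f9', 'mu': '\u30e0', 'xhu': '\u31f7', 'xwa': '\u30ee', 'va': '\u30f7', 've': '\u30f9', 'vi': '\u30f8', 'vo': '\u30fa', 'vu': '\u30f4', 'ni': '\u30cb', 'xro': '\u31ff', 'xri': '\u31fc', 'no': '\u30ce', 'xre': '\u31fe', 'na': '\u30ca', 'xka': '\u30f5', 'xra': '\u31fb', 'ne': '\u30cd', 'xke': '\u30f6', 'xru': '\u31fd', 'mi': '\u30df', 'nu':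 '\u30cc', 'xku': '\u31f0', 'a': '\u30a2', 'ka': '\u30ab', 'e': '\u30a8', 'ke': '\u30b1', 'i': '\u30a4', 'ki': '\u30ad', 'ko': '\u30b3', 'su': '\u30b9', "n'": '\u30f3', 'si': '\u30b7', 'u': '\u30a6', 'ku': '\u30af', 'sa': '\u30b5', 'se': '\u30bb'}
--
-- def unicify(j):
--     """Convert parse_roma output to Unicode kana.
--
--     Use only on parse_roma output.  If converting a fixed string of
--     user input, use kanafy, which runs it through parse_roma first.
--     For real-time user input, use in conjunction with parse_roma.
--     """
--     r = ""
--     while j: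
--         u = j
--         j = ""
--         while (u) and (u not in _to_kana):
--             j = u[-1] + j
--             u = u[:-1]
--         if (not u) and j:
--             r += j[0]
--             j=j[1:]
--         elif u:
--             r += _to_kana[u]
--     return r
-- ===== SOURCE B (Python) =====
-- _LINES = ("gu\u30b0", "-\u30fc", "ge\u30b2", "ga\u30ac", "go\u30b4", "gi\u30ae", "xo\u30a9", "xtu\u30c3", "tu\u30c4", "to\u30c8", "ti\u30c1", "xto\u31f3", "xmu\u31fa", "^\u30fc", "ta\u30bf", "do\u30c9", "yo\u30e8", "di\u30c2", "ya\u30e4", "de\u30c7", "ye\U0001b001", "da\u30c0", "du\u30c5", "yu\u30e6", "xsu\u31f2", "t\u30c3", "xsi\u31f1", "xhi\u31f6", "zo\u30be", "zi\u30b8", "ze\u30bc", "za\u30b6", "zu\u30ba", "ru\u30eb", "re\u30ec", "ra\u30e9", "ro\u30ed", "ri\u30ea", "be\u30d9", "we\u30f1", "ba\u30d0", "wa\u30ef", "wo\u30f2", "bo\u30dc", "bi\u30d3", "wi\u30f0", "bu\u30d6", "xyo\u30e7", "xnu\u31f4", "so\u30bd", "o\u30aa", "~\u301c", "xi\u30a3",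 "xyu\u30e5", "xa\u30a1", "xe\u30a7", "xya\u30e3", "xu\u30a5", "pu\u30d7", ".\u3002", "pa\u30d1", "pe\u30da", "pi\u30d4", "po\u30dd", "hu\u30d5", "hi\u30d2", "ho\u30db", "ha\u30cf", "he\u30d8", "me\u30e1", "xha\u31f5", "te\u30c6", "ma\u30de", "xhe\u31f8", "mo\u30e2", "xho\u31f9", "mu\u30e0", "xhu\u31f7", "xwa\u30ee", "va\u30f7", "ve\u30f9", "vi\u30f8", "vo\u30fa", "vu\u30f4", "ni\u30cb", "xro\u31ff", "xri\u31fc", "no\u30ce", "xre\u31fe", "na\u30ca", "xka\u30f5", "xra\u31fb", "ne\u30cd", "xke\u30f6", "xru\u31fd", "mi\u30df", "nu\u30cc", "xku\u31f0", "a\u30a2", "ka\u30ab", "e\u30a8", "ke\u30b1", "i\u30a4", "ki\u30ad", "ko\u30b3", "su\u30b9", "n'\u30f3", "si\u30b7", "u\u30a6", "ku\u30af", "sa\u30b5", "se\u30bb")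
--
-- _to = {_line[:-1]: _line[-1] for _line in _LINES}
--
--
-- def unicify(j):
--     """Convert parse_roma output to Unicode kana.
--
--     Single left-to-right pass: every romaji token is at most 3 characters,
--     so at each position try the 3-, 2- and 1-character prefix (longest
--     first); on a hit emit the kana and skip the token, otherwise copy the
--     character unchanged.
--     """
--     out = []
--     i = 0
--     n = len(j)
--     while i < n:
--         for L in (3, 2, 1):
--             k = _to.get(j[i:i + L])
--             if k is not None:
--                 out.append(k)
--                 i += L
--                 break
--         else:
--             out.append(j[i])
--             i += 1
--     return "".join(out)
-- ===== Notes on version B (the rewrite author's own statement) =====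
-- stated objective: faster
-- what changed: A repeatedly rebuilds the remaining string character by character, shrinking the whole suffix from the right until a dict key is found; B makes a single left-to-right pass that, at each position, tries only the 3-, 2- and 1-character prefixes (every key has length <= 3), with the romaji table stored compactly as one key+kana string per entry and parsed into the dict once.
import Mathlib
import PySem

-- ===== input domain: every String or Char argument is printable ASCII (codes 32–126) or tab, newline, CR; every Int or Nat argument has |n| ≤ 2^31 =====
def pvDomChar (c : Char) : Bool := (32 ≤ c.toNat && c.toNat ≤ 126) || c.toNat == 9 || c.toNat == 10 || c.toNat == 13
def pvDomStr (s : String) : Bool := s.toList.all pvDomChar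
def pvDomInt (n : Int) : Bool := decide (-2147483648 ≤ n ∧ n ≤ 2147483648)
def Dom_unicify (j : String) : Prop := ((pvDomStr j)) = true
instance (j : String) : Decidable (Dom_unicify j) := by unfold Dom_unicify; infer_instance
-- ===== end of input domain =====

-- B replaces A's repeated right-to-left shrinking of the whole remaining string by a single
-- left-to-right pass trying only the 3-, 2- and 1-character prefixes (all keys have length ≤ 3),
-- with the table stored compactly (one key++kana string per entry) parsed into a dict: faster.

-- ===== PORT A =====
def toKana : PySem.Dict String String := PySem.Dict.mk [
  ("gu", "グ"),
  ("-", "ー"),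
  ("ge", "ゲ"),
  ("ga", "ガ"),
  ("go", "ゴ"),
  ("gi", "ギ"),
  ("xo", "ォ"),
  ("xtu", "ッ"),
  ("tu", "ツ"),
  ("to", "ト"),
  ("ti", "チ"),
  ("xto", "ㇳ"),
  ("xmu", "ㇺ"),
  ("^", "ー"),
  ("ta", "タ"),
  ("do", "ド"),
  ("yo", "ヨ"),
  ("di", "ヂ"),
  ("ya", "ヤ"),
  ("de", "デ"),
  ("ye", "𛀁"),
  ("da", "ダ"),
  ("du", "ヅ"),
  ("yu", "ユ"),
  ("xsu", "ㇲ"),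
  ("t", "ッ"),
  ("xsi", "ㇱ"),
  ("xhi", "ㇶ"),
  ("zo", "ゾ"),
  ("zi", "ジ"),
  ("ze", "ゼ"),
  ("za", "ザ"),
  ("zu", "ズ"),
  ("ru", "ル"),
  ("re", "レ"),
  ("ra", "ラ"),
  ("ro", "ロ"),
  ("ri", "リ"),
  ("be", "ベ"),
  ("we", "ヱ"),
  ("ba", "バ"),
  ("wa", "ワ"),
  ("wo", "ヲ"),
  ("bo", "ボ"),
  ("bi", "ビ"),
  ("wi", "ヰ"),
  ("bu", "ブ"),
  ("xyo", "ョ"),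
  ("xnu", "ㇴ"),
  ("so", "ソ"),
  ("o", "オ"),
  ("~", "〜"),
  ("xi", "ィ"),
  ("xyu", "ュ"),
  ("xa", "ァ"),
  ("xe", "ェ"),
  ("xya", "ャ"),
  ("xu", "ゥ"),
  ("pu", "プ"),
  (".", "。"),
  ("pa", "パ"),
  ("pe", "ペ"),
  ("pi", "ピ"),
  ("po", "ポ"),
  ("hu", "フ"),
  ("hi", "ヒ"),
  ("ho", "ホ"),
  ("ha", "ハ"),
  ("he", "ヘ"),
  ("me", "メ"),
  ("xha", "ㇵ"),
  ("te", "テ"),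
  ("ma", "マ"),
  ("xhe", "ㇸ"),
  ("mo", "モ"),
  ("xho", "ㇹ"),
  ("mu", "ム"),
  ("xhu", "ㇷ"),
  ("xwa", "ヮ"),
  ("va", "ヷ"),
  ("ve", "ヹ"),
  ("vi", "ヸ"),
  ("vo", "ヺ"),
  ("vu", "ヴ"),
  ("ni", "ニ"),
  ("xro", "ㇿ"),
  ("xri", "ㇼ"),
  ("no", "ノ"),
  ("xre", "ㇾ"),
  ("na", "ナ"),
  ("xka", "ヵ"),
  ("xra", "ㇻ"),
  ("ne", "ネ"),
  ("xke", "ヶ"),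
  ("xru", "ㇽ"),
  ("mi", "ミ"),
  ("nu", "ヌ"),
  ("xku", "ㇰ"),
  ("a", "ア"),
  ("ka", "カ"),
  ("e", "エ"),
  ("ke", "ケ"),
  ("i", "イ"),
  ("ki", "キ"),
  ("ko", "コ"),
  ("su", "ス"),
  ("n'", "ン"),
  ("si", "シ"),
  ("u", "ウ"),
  ("ku", "ク"),
  ("sa", "サ"),
  ("se", "セ")]

-- A's inner `while (u) and (u not in _to_kana)` loop: moves characters from the end of u to the front of jAcc
def unicifyInner (u jAcc : List Char) : List Char × List Char :=
  if h : u ≠ [] ∧ toKana.get? (String.ofList u) = none then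
    unicifyInner u.dropLast (u.getLast h.1 :: jAcc)
  else (u, jAcc)
termination_by u.length
decreasing_by
  have := List.length_pos_of_ne_nil h.1
  simp [List.length_dropLast]; omega

-- invariant of the inner loop (the outer loop's termination proof cites it)
theorem unicifyInner_append (u a : List Char) :
    (unicifyInner u a).1 ++ (unicifyInner u a).2 = u ++ a := by
  rw [unicifyInner]
  split
  · next h =>
      rw [unicifyInner_append u.dropLast (u.getLast h.1 :: a)]
      rw [← List.singleton_append, ← List.append_assoc, List.dropLast_append_getLast h.1]
  · rfl
termination_by u.length
decreasing_by
  rename_i h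
  have := List.length_pos_of_ne_nil h.1
  simp [List.length_dropLast]; omega

-- A's outer `while j` loop; `_to_kana[u]`'s KeyError case is the unreachable `none => []`
-- (the inner loop only ever returns a nonempty u when it is a key)
def unicifyOuter (j r : List Char) : List Char :=
  if _hj : j = [] then r
  else
    if _h1 : (unicifyInner j []).1 = [] ∧ (unicifyInner j []).2 ≠ [] then
      unicifyOuter (unicifyInner j []).2.tail (r ++ [(unicifyInner j []).2.head!])
    else if _h2 : (unicifyInner j []).1 ≠ [] then
      unicifyOuter (unicifyInner j []).2
        (r ++ (match toKana.get? (String.ofList (unicifyInner j []).1) with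
               | some k => k.toList
               | none => []))
    else r
termination_by j.length
decreasing_by
  · have hap := unicifyInner_append j []
    rw [_h1.1] at hap
    simp only [List.nil_append, List.append_nil] at hap
    have hpos := List.length_pos_of_ne_nil _h1.2
    rw [hap] at hpos ⊢
    simp [List.length_tail]
    omega
  · have hap := unicifyInner_append j []
    have h3 := List.length_pos_of_ne_nil _h2
    have : (unicifyInner j []).1.length + (unicifyInner j []).2.length = j.length := by
      rw [← List.length_append, hap]; simp
    omega

def unicify (j : String) : String := String.ofList (unicifyOuter j.toList [])

-- ===== PORT B =====
-- Source B stores the table compactly: each entry is one string, romaji key ++ its single kana char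
def altLines : List String := [
  "guグ",
  "-ー",
  "geゲ",
  "gaガ",
  "goゴ",
  "giギ",
  "xoォ",
  "xtuッ",
  "tuツ",
  "toト",
  "tiチ",
  "xtoㇳ",
  "xmuㇺ",
  "^ー",
  "taタ",
  "doド",
  "yoヨ",
  "diヂ",
  "yaヤ",
  "deデ",
  "ye𛀁",
  "daダ",
  "duヅ",
  "yuユ",
  "xsuㇲ",
  "tッ",
  "xsiㇱ",
  "xhiㇶ",
  "zoゾ",
  "ziジ",
  "zeゼ",
  "zaザ",
  "zuズ",
  "ruル",
  "reレ",
  "raラ",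
  "roロ",
  "riリ",
  "beベ",
  "weヱ",
  "baバ",
  "waワ",
  "woヲ",
  "boボ",
  "biビ",
  "wiヰ",
  "buブ",
  "xyoョ",
  "xnuㇴ",
  "soソ",
  "oオ",
  "~〜",
  "xiィ",
  "xyuュ",
  "xaァ",
  "xeェ",
  "xyaャ",
  "xuゥ",
  "puプ",
  ".。",
  "paパ",
  "peペ",
  "piピ",
  "poポ",
  "huフ",
  "hiヒ",
  "hoホ",
  "haハ",
  "heヘ",
  "meメ",
  "xhaㇵ",
  "teテ",
  "maマ",
  "xheㇸ",
  "moモ",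
  "xhoㇹ",
  "muム",
  "xhuㇷ",
  "xwaヮ",
  "vaヷ",
  "veヹ",
  "viヸ",
  "voヺ",
  "vuヴ",
  "niニ",
  "xroㇿ",
  "xriㇼ",
  "noノ",
  "xreㇾ",
  "naナ",
  "xkaヵ",
  "xraㇻ",
  "neネ",
  "xkeヶ",
  "xruㇽ",
  "miミ",
  "nuヌ",
  "xkuㇰ",
  "aア",
  "kaカ",
  "eエ",
  "keケ",
  "iイ",
  "kiキ",
  "koコ",
  "suス",
  "n'ン",
  "siシ",
  "uウ",
  "kuク",
  "saサ",
  "seセ"]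

-- the dict comprehension {line[:-1]: line[-1] for line in _LINES}
-- (line[:-1] / line[-1] written on the char list; every line is nonempty, so getLast! is exact)
def altDict : PySem.Dict String String :=
  PySem.Dict.ofList (altLines.map
    (fun line => (String.ofList line.toList.dropLast, String.ofList [line.toList.getLast!])))

set_option maxRecDepth 40000 in
-- B's single pass: at each position try the 3-, 2-, 1-character prefix (the unrolled `for L in (3, 2, 1)`)
def altGo (l : List Char) : List Char :=
  match l with
  | [] => []
  | c :: rest =>
    match altDict.get? (String.ofList ((c :: rest).take 3)) with
    | some k => k.toList ++ altGo ((c :: rest).drop 3)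
    | none =>
      match altDict.get? (String.ofList ((c :: rest).take 2)) with
      | some k => k.toList ++ altGo ((c :: rest).drop 2)
      | none =>
        match altDict.get? (String.ofList [c]) with
        | some k => k.toList ++ altGo rest
        | none => c :: altGo rest
termination_by l.length
decreasing_by
  all_goals simp only [List.length_drop, List.length_cons]; omega

def unicify_alt (j : String) : String := String.ofList (altGo j.toList)

-- ===== PRECONDITION & SPEC =====
def Spec_unicify (j : String) (out : String) : Prop := out = unicify_alt j
instance (j : String) (out : String) : Decidable (Spec_unicify j out) := by unfold Spec_unicify; infer_instance

-- ===== CLAIM (what is proved, stated in full; the proofs are below) =====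
def Claim_equal_unicify : Prop := ∀ (j : String), Dom_unicify j → Spec_unicify j (unicify j)

-- ===== LEMMAS AND PROOFS =====

-- B's parsed compact table is exactly A's dict
set_option maxRecDepth 100000 in
set_option maxHeartbeats 2000000 in
theorem altDict_eq : altDict = toKana := by decide

theorem altDict_get (s : String) : altDict.get? s = toKana.get? s := by rw [altDict_eq]

-- every key of the table has at most 3 characters, so no longer string is ever a key
set_option maxRecDepth 8000 in
theorem toKana_get?_long (s : List Char) (h : 3 < s.length) :
    toKana.get? (String.ofList s) = none := by
  cases hk : toKana.get? (String.ofList s) with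
  | none => rfl
  | some v =>
    have hm := PySem.Dict.mem_items_of_get?_eq_some toKana hk
    have hall : ∀ p ∈ toKana.items, p.1.toList.length ≤ 3 := by decide
    have h3 := hall _ hm
    simp at h3
    omega

-- the inner loop only ever inspects the first three characters of its argument
theorem inner_take3 (u a : List Char) :
    unicifyInner u a = unicifyInner (u.take 3) (u.drop 3 ++ a) := by
  by_cases h : u.length ≤ 3
  · rw [List.take_of_length_le h, List.drop_of_length_le h]; simp
  · rw [Nat.not_le] at h
    have hne : u ≠ [] := by intro e; subst e; simp at h
    rw [unicifyInner, dif_pos ⟨hne, toKana_get?_long u h⟩]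
    rw [inner_take3 u.dropLast (u.getLast hne :: a)]
    have hlen : 3 ≤ u.dropLast.length := by simp [List.length_dropLast]; omega
    conv_rhs => rw [← List.dropLast_append_getLast hne]
    rw [List.take_append_of_le_length hlen, List.drop_append_of_le_length hlen]
    simp
termination_by u.length
decreasing_by
  have := List.length_pos_of_ne_nil hne
  simp [List.length_dropLast]; omega

-- one unfolding of the inner loop when the current u is a key (or empty)
theorem inner_stop (u a : List Char) (h : ¬(u ≠ [] ∧ toKana.get? (String.ofList u) = none)) :
    unicifyInner u a = (u, a) := by
  rw [unicifyInner, dif_neg h]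

theorem inner_step (u a : List Char) (h1 : u ≠ []) (h2 : toKana.get? (String.ofList u) = none) :
    unicifyInner u a = unicifyInner u.dropLast (u.getLast h1 :: a) := by
  rw [unicifyInner, dif_pos ⟨h1, h2⟩]

-- one outer iteration when the inner loop found a key
theorem outer_key (l r u rest : List Char) (hl : l ≠ [])
    (hin : unicifyInner l [] = (u, rest)) (hu : u ≠ [])
    (k : String) (hk : toKana.get? (String.ofList u) = some k) :
    unicifyOuter l r = unicifyOuter rest (r ++ k.toList) := by
  rw [unicifyOuter, dif_neg hl, hin]
  rw [dif_neg (by simp [hu]), dif_pos hu, hk]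

-- one outer iteration when the inner loop found no key at all
theorem outer_fallback (l r : List Char) (hl : l ≠ [])
    (hin : unicifyInner l [] = ([], l)) :
    unicifyOuter l r = unicifyOuter l.tail (r ++ [l.head!]) := by
  rw [unicifyOuter, dif_neg hl, hin]
  rw [dif_pos ⟨rfl, hl⟩]

theorem outer_eq_altGo : ∀ (n : Nat) (l : List Char), l.length ≤ n →
    ∀ r, unicifyOuter l r = r ++ altGo l := by
  intro n
  induction n with
  | zero =>
    intro l hl r
    have : l = [] := by cases l <;> simp_all
    subst this
    simp [unicifyOuter, altGo]
  | succ n ih =>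
    intro l hl r
    rcases l with _ | ⟨c, _ | ⟨d, _ | ⟨e, rest⟩⟩⟩
    · simp [unicifyOuter, altGo]
    · -- l = [c]
      cases hk1 : toKana.get? (String.ofList [c]) with
      | some k =>
        rw [outer_key [c] r [c] [] (by simp) (inner_stop _ _ (by simp [hk1])) (by simp) k hk1]
        simp [unicifyOuter, altGo, altDict_get, hk1]
      | none =>
        have hin : unicifyInner [c] [] = ([], [c]) := by
          rw [inner_step [c] [] (by simp) hk1]
          exact inner_stop _ _ (by simp)
        rw [outer_fallback [c] r (by simp) hin]
        simp [unicifyOuter, altGo, altDict_get, hk1]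
    · -- l = [c, d]
      cases hk2 : toKana.get? (String.ofList [c, d]) with
      | some k =>
        rw [outer_key [c, d] r [c, d] [] (by simp) (inner_stop _ _ (by simp [hk2])) (by simp) k hk2]
        simp [unicifyOuter, altGo, altDict_get, hk2]
      | none =>
        have hstep : unicifyInner [c, d] [] = unicifyInner [c] [d] := by
          rw [inner_step [c, d] [] (by simp) hk2]; rfl
        cases hk1 : toKana.get? (String.ofList [c]) with
        | some k =>
          rw [outer_key [c, d] r [c] [d] (by simp)
                (by rw [hstep]; exact inner_stop _ _ (by simp [hk1])) (by simp) k hk1]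
          rw [ih [d] (by simpa using Nat.le_of_succ_le_succ hl)]
          simp [altGo, altDict_get, hk2, hk1]
        | none =>
          have hin : unicifyInner [c, d] [] = ([], [c, d]) := by
            rw [hstep, inner_step [c] [d] (by simp) hk1]
            exact inner_stop _ _ (by simp)
          rw [outer_fallback [c, d] r (by simp) hin]
          simp only [List.tail_cons, List.head!_cons]
          rw [ih [d] (by simpa using Nat.le_of_succ_le_succ hl)]
          simp [altGo, altDict_get, hk2, hk1]
    · -- l = c :: d :: e :: rest
      have hlen : rest.length + 2 ≤ n := by simpa using hl
      have hi : unicifyInner (c :: d :: e :: rest) [] = unicifyInner [c, d, e] rest := by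
        have h3 := inner_take3 (c :: d :: e :: rest) []
        simpa using h3
      cases hk3 : toKana.get? (String.ofList [c, d, e]) with
      | some k =>
        rw [outer_key _ r [c, d, e] rest (by simp)
              (by rw [hi]; exact inner_stop _ _ (by simp [hk3])) (by simp) k hk3]
        rw [ih rest (by omega)]
        simp [altGo, altDict_get, hk3]
      | none =>
        have hstep2 : unicifyInner (c :: d :: e :: rest) [] = unicifyInner [c, d] (e :: rest) := by
          rw [hi, inner_step [c, d, e] rest (by simp) hk3]; rfl
        cases hk2 : toKana.get? (String.ofList [c, d]) with
        | some k =>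
          rw [outer_key _ r [c, d] (e :: rest) (by simp)
                (by rw [hstep2]; exact inner_stop _ _ (by simp [hk2])) (by simp) k hk2]
          rw [ih (e :: rest) (by simp; omega)]
          simp [altGo, altDict_get, hk3, hk2]
        | none =>
          have hstep1 : unicifyInner (c :: d :: e :: rest) [] = unicifyInner [c] (d :: e :: rest) := by
            rw [hstep2, inner_step [c, d] (e :: rest) (by simp) hk2]; rfl
          cases hk1 : toKana.get? (String.ofList [c]) with
          | some k =>
            rw [outer_key _ r [c] (d :: e :: rest) (by simp)
                  (by rw [hstep1]; exact inner_stop _ _ (by simp [hk1])) (by simp) k hk1]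
            rw [ih (d :: e :: rest) (by simp; omega)]
            simp [altGo, altDict_get, hk3, hk2, hk1]
          | none =>
            have hin : unicifyInner (c :: d :: e :: rest) [] = ([], c :: d :: e :: rest) := by
              rw [hstep1, inner_step [c] (d :: e :: rest) (by simp) hk1]
              exact inner_stop _ _ (by simp)
            rw [outer_fallback _ r (by simp) hin]
            simp only [List.tail_cons, List.head!_cons]
            rw [ih (d :: e :: rest) (by simp; omega)]
            simp [altGo, altDict_get, hk3, hk2, hk1]

-- ===== VERDICT (by name: the statement is the Claim_ definition above) =====
theorem unicify_spec : Claim_equal_unicify := by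
  intro j _
  unfold Spec_unicify unicify unicify_alt
  rw [outer_eq_altGo j.toList.length j.toList le_rfl []]
  simp
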